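-- pv_equiv track=rewrite | github.com/eldadi9/ZimmerBot_Main_Eldad | database/import_bookings_from_calendar.py | parse_event_description
-- ===== SOURCE A (Python) =====
-- def parse_event_description(description: str) -> dict:
--     """
--     Parse event description to extract booking details
--     Expected format:
--     Cabin: ZB01
--     Customer: John Doe
--     Phone: 050-1234567
--     Check-in: 2026-02-01T15:00:00
--     Check-out: 2026-02-02T11:00:00
--     Notes: Some notes
--     """
--     result = {
--         "cabin_id": None,
--         "customer_name": None,
--         "phone": None,
--         "email": None,
--         "notes": None,
--         "adults": None,
--         "kids": None,
--     }
--
--     if not description: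
--         return result
--
--     lines = description.split("\n")
--     for line in lines:
--         line = line.strip()
--         if line.startswith("Cabin:"):
--             result["cabin_id"] = line.replace("Cabin:", "").strip()
--         elif line.startswith("Customer:"):
--             result["customer_name"] = line.replace("Customer:", "").strip()
--         elif line.startswith("Phone:"):
--             result["phone"] = line.replace("Phone:", "").strip()
--         elif line.startswith("Email:"):
--             result["email"] = line.replace("Email:", "").strip()
--         elif line.startswith("Notes:"):
--             result["notes"] = line.replace("Notes:", "").strip()
--         elif line.startswith("Adults:"):
--             try:
--                 result["adults"] = int(line.replace("Adults:", "").strip())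
--             except:
--                 pass
--         elif line.startswith("Kids:"):
--             try:
--                 result["kids"] = int(line.replace("Kids:", "").strip())
--             except:
--                 pass
--
--     return result
-- ===== SOURCE B (Python) =====
-- def _to_int(value):
--     try:
--         return int(value)
--     except ValueError:
--         return None
--
--
-- _FIELDS = [
--     ("cabin_id", "Cabin:", lambda v: v),
--     ("customer_name", "Customer:", lambda v: v),
--     ("phone", "Phone:", lambda v: v),
--     ("email", "Email:", lambda v: v),
--     ("notes", "Notes:", lambda v: v),
--     ("adults", "Adults:", _to_int),
--     ("kids", "Kids:", _to_int),
-- ]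
--
--
-- def _last_value(lines, prefix, conv):
--     # later lines overwrite earlier ones, so scan backwards and stop at the
--     # first matching line whose conversion succeeds
--     for line in reversed(lines):
--         if line.startswith(prefix):
--             value = conv(line.replace(prefix, "").strip())
--             if value is not None:
--                 return value
--     return None
--
--
-- def parse_event_description(description: str) -> dict:
--     lines = [ln.strip() for ln in description.split("\n")] if description else []
--     return {key: _last_value(lines, prefix, conv) for key, prefix, conv in _FIELDS}
-- ===== Notes on version B (the rewrite author's own statement) =====
-- stated objective: alternative
-- what changed: Replaces A's single forward pass with a per-line seven-branch elif dispatch by staged per-field processing: lines are stripped once, then each of the seven fields is computed independently by scanning the lines BACKWARDS and returning at the first matching line whose conversion succeeds (correct because later lines overwrite earlier ones, no line starts with two of the prefixes, and a failed int() leaves the previous value).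
import Mathlib
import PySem

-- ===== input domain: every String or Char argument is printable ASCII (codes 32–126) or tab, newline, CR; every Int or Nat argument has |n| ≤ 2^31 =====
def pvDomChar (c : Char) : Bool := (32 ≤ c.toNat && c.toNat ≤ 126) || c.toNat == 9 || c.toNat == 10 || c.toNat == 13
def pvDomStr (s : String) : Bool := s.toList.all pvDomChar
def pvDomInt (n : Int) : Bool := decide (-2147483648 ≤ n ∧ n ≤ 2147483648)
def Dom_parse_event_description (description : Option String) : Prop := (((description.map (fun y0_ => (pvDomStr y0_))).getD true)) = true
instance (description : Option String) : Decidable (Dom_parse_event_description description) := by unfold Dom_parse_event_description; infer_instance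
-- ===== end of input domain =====

-- B replaces A's single forward pass with per-line elif dispatch by staged per-field
-- backward scans (first matching line from the end whose conversion succeeds); same cost.
-- Python-dict int values are rendered via str(n) (PySem.Int.toStr).

-- ===== PORT A =====
def pvInitA : PySem.Dict String (Option String) :=
  PySem.Dict.ofList [("cabin_id", none), ("customer_name", none), ("phone", none),
    ("email", none), ("notes", none), ("adults", none), ("kids", none)]

-- A's elif chain on one stripped line; '.elim d (…)' is the try/int/except-pass: none (ValueError) leaves d unchanged
def pvChainA (d : PySem.Dict String (Option String)) (line : String) :
    PySem.Dict String (Option String) :=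
  if PySem.Str.startswith line "Cabin:" then
    d.insert "cabin_id" (some (PySem.Str.strip (PySem.Str.replace line "Cabin:" "")))
  else if PySem.Str.startswith line "Customer:" then
    d.insert "customer_name" (some (PySem.Str.strip (PySem.Str.replace line "Customer:" "")))
  else if PySem.Str.startswith line "Phone:" then
    d.insert "phone" (some (PySem.Str.strip (PySem.Str.replace line "Phone:" "")))
  else if PySem.Str.startswith line "Email:" then
    d.insert "email" (some (PySem.Str.strip (PySem.Str.replace line "Email:" "")))
  else if PySem.Str.startswith line "Notes:" then
    d.insert "notes" (some (PySem.Str.strip (PySem.Str.replace line "Notes:" "")))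
  else if PySem.Str.startswith line "Adults:" then
    (PySem.Int.ofStr? (PySem.Str.strip (PySem.Str.replace line "Adults:" ""))).elim d
      (fun n => d.insert "adults" (some (PySem.Int.toStr n)))
  else if PySem.Str.startswith line "Kids:" then
    (PySem.Int.ofStr? (PySem.Str.strip (PySem.Str.replace line "Kids:" ""))).elim d
      (fun n => d.insert "kids" (some (PySem.Int.toStr n)))
  else d

def parse_event_description (description : Option String) : List (String × Option String) :=
  match description with
  | none => pvInitA.items
  | some s =>
    if s == "" then pvInitA.items
    else (((PySem.Str.split? s "\n").getD []).foldl
      (fun d raw => pvChainA d (PySem.Str.strip raw)) pvInitA).items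

-- ===== PORT B =====
-- converters: text is the identity, int is try int(v) / except ValueError -> None
def pvConvText (v : String) : Option String := some v
def pvConvInt (v : String) : Option String := (PySem.Int.ofStr? v).map PySem.Int.toStr

-- fields table: (result key, prefix, converter)
def pvFieldsB : List (String × String × (String → Option String)) :=
  [("cabin_id", "Cabin:", pvConvText),
   ("customer_name", "Customer:", pvConvText),
   ("phone", "Phone:", pvConvText),
   ("email", "Email:", pvConvText),
   ("notes", "Notes:", pvConvText),
   ("adults", "Adults:", pvConvInt),
   ("kids", "Kids:", pvConvInt)]

-- 'for line in reversed(lines): …' — recursion over the reversed list, return on first success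
def pvScanB (prefix_ : String) (conv : String → Option String) : List String → Option String
  | [] => none
  | line :: rest =>
    if PySem.Str.startswith line prefix_ then
      match conv (PySem.Str.strip (PySem.Str.replace line prefix_ "")) with
      | some v => some v
      | none => pvScanB prefix_ conv rest
    else pvScanB prefix_ conv rest

def pvLastValueB (lines : List String) (prefix_ : String) (conv : String → Option String) :
    Option String :=
  pvScanB prefix_ conv lines.reverse

def parse_event_description_alt (description : Option String) : List (String × Option String) :=
  let lines : List String :=
    match description with
    | none => []
    | some s =>
      if s == "" then []
      else ((PySem.Str.split? s "\n").getD []).map PySem.Str.strip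
  (PySem.Dict.ofList
    (pvFieldsB.map (fun e => (e.1, pvLastValueB lines e.2.1 e.2.2)))).items

-- ===== PRECONDITION & SPEC =====
def Spec_parse_event_description (description : Option String) (out : List (String × Option String)) : Prop := out = parse_event_description_alt description
instance (description : Option String) (out : List (String × Option String)) : Decidable (Spec_parse_event_description description out) := by unfold Spec_parse_event_description; infer_instance

-- ===== CLAIM (what is proved, stated in full; the proofs are below) =====
def Claim_equal_parse_event_description : Prop := ∀ (description : Option String), Dom_parse_event_description description → Spec_parse_event_description description (parse_event_description description)

-- ===== LEMMAS AND PROOFS =====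

-- the 7-slot dict every intermediate state of A's loop is
def pvMk (a b c d e f g : Option String) : PySem.Dict String (Option String) :=
  PySem.Dict.mk [("cabin_id", a), ("customer_name", b), ("phone", c),
    ("email", d), ("notes", e), ("adults", f), ("kids", g)]

theorem pvOfList7 (a b c d e f g : Option String) :
    PySem.Dict.ofList [("cabin_id", a), ("customer_name", b), ("phone", c),
      ("email", d), ("notes", e), ("adults", f), ("kids", g)] = pvMk a b c d e f g := rfl

-- effect of one line on one field's value (head of the reversed list is checked first)
def pvUpd (p : String) (c : String → Option String) (l : String) (v : Option String) :
    Option String :=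
  if PySem.Str.startswith l p then
    match c (PySem.Str.strip (PySem.Str.replace l p "")) with
    | some w => some w
    | none => v
  else v

theorem pvScanB_cons (p : String) (c : String → Option String) (l : String) (rs : List String) :
    pvScanB p c (l :: rs) = pvUpd p c l (pvScanB p c rs) := rfl

-- no string starts with two prefixes of which neither is a prefix of the other
theorem pvExcl (p q l : String) (hp : ¬ p.toList <+: q.toList) (hq : ¬ q.toList <+: p.toList)
    (h : PySem.Str.startswith l p = true) : PySem.Str.startswith l q = false := by
  by_contra hc
  have hq' : PySem.Str.startswith l q = true := by
    cases hqe : PySem.Str.startswith l q with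
    | false => exact absurd hqe hc
    | true => rfl
  have h1 : p.toList <+: l.toList := by
    rw [PySem.Str.startswith_eq] at h
    exact (PySem.Chars.startswith_iff _ _).mp h
  have h2 : q.toList <+: l.toList := by
    rw [PySem.Str.startswith_eq] at hq'
    exact (PySem.Chars.startswith_iff _ _).mp hq'
  rcases List.prefix_or_prefix_of_prefix h1 h2 with h3 | h3
  · exact hp h3
  · exact hq h3

-- per-slot behaviour of pvUpd
theorem pvUpd_neg (p : String) (c : String → Option String) (l : String) (v : Option String)
    (h : PySem.Str.startswith l p = false) : pvUpd p c l v = v := by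
  unfold pvUpd
  rw [if_neg (by rw [h]; decide)]

theorem pvUpd_pos_text (p l : String) (v : Option String)
    (h : PySem.Str.startswith l p = true) :
    pvUpd p pvConvText l v = some (PySem.Str.strip (PySem.Str.replace l p "")) := by
  unfold pvUpd pvConvText
  rw [if_pos h]

theorem pvUpd_pos_int (p l : String) (v : Option String)
    (h : PySem.Str.startswith l p = true) :
    pvUpd p pvConvInt l v =
      (PySem.Int.ofStr? (PySem.Str.strip (PySem.Str.replace l p ""))).elim v
        (fun n => some (PySem.Int.toStr n)) := by
  unfold pvUpd pvConvInt
  rw [if_pos h]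
  cases PySem.Int.ofStr? (PySem.Str.strip (PySem.Str.replace l p "")) <;> rfl

-- one line of A's chain updates each of the seven fields exactly as pvUpd does
theorem pvStepEq (l : String) (a b c d e f g : Option String) :
    pvChainA (pvMk a b c d e f g) l =
      pvMk (pvUpd "Cabin:" pvConvText l a) (pvUpd "Customer:" pvConvText l b)
        (pvUpd "Phone:" pvConvText l c) (pvUpd "Email:" pvConvText l d)
        (pvUpd "Notes:" pvConvText l e) (pvUpd "Adults:" pvConvInt l f)
        (pvUpd "Kids:" pvConvInt l g) := by
  unfold pvChainA
  by_cases h1 : PySem.Str.startswith l "Cabin:" = true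
  · have g2 : PySem.Str.startswith l "Customer:" = false := pvExcl "Cabin:" "Customer:" l (by decide) (by decide) h1
    have g3 : PySem.Str.startswith l "Phone:" = false := pvExcl "Cabin:" "Phone:" l (by decide) (by decide) h1
    have g4 : PySem.Str.startswith l "Email:" = false := pvExcl "Cabin:" "Email:" l (by decide) (by decide) h1
    have g5 : PySem.Str.startswith l "Notes:" = false := pvExcl "Cabin:" "Notes:" l (by decide) (by decide) h1
    have g6 : PySem.Str.startswith l "Adults:" = false := pvExcl "Cabin:" "Adults:" l (by decide) (by decide) h1
    have g7 : PySem.Str.startswith l "Kids:" = false := pvExcl "Cabin:" "Kids:" l (by decide) (by decide) h1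
    rw [if_pos h1, pvUpd_pos_text "Cabin:" l a h1, pvUpd_neg "Customer:" pvConvText l b g2, pvUpd_neg "Phone:" pvConvText l c g3, pvUpd_neg "Email:" pvConvText l d g4, pvUpd_neg "Notes:" pvConvText l e g5, pvUpd_neg "Adults:" pvConvInt l f g6, pvUpd_neg "Kids:" pvConvInt l g g7]
    rfl
  by_cases h2 : PySem.Str.startswith l "Customer:" = true
  · have f1 : PySem.Str.startswith l "Cabin:" = false := (Bool.not_eq_true _).mp h1
    have g3 : PySem.Str.startswith l "Phone:" = false := pvExcl "Customer:" "Phone:" l (by decide) (by decide) h2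
    have g4 : PySem.Str.startswith l "Email:" = false := pvExcl "Customer:" "Email:" l (by decide) (by decide) h2
    have g5 : PySem.Str.startswith l "Notes:" = false := pvExcl "Customer:" "Notes:" l (by decide) (by decide) h2
    have g6 : PySem.Str.startswith l "Adults:" = false := pvExcl "Customer:" "Adults:" l (by decide) (by decide) h2
    have g7 : PySem.Str.startswith l "Kids:" = false := pvExcl "Customer:" "Kids:" l (by decide) (by decide) h2
    rw [if_neg (by rw [f1]; decide), if_pos h2, pvUpd_neg "Cabin:" pvConvText l a f1, pvUpd_pos_text "Customer:" l b h2, pvUpd_neg "Phone:" pvConvText l c g3, pvUpd_neg "Email:" pvConvText l d g4, pvUpd_neg "Notes:" pvConvText l e g5, pvUpd_neg "Adults:" pvConvInt l f g6, pvUpd_neg "Kids:" pvConvInt l g g7]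
    rfl
  by_cases h3 : PySem.Str.startswith l "Phone:" = true
  · have f1 : PySem.Str.startswith l "Cabin:" = false := (Bool.not_eq_true _).mp h1
    have f2 : PySem.Str.startswith l "Customer:" = false := (Bool.not_eq_true _).mp h2
    have g4 : PySem.Str.startswith l "Email:" = false := pvExcl "Phone:" "Email:" l (by decide) (by decide) h3
    have g5 : PySem.Str.startswith l "Notes:" = false := pvExcl "Phone:" "Notes:" l (by decide) (by decide) h3
    have g6 : PySem.Str.startswith l "Adults:" = false := pvExcl "Phone:" "Adults:" l (by decide) (by decide) h3
    have g7 : PySem.Str.startswith l "Kids:" = false := pvExcl "Phone:" "Kids:" l (by decide) (by decide) h3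
    rw [if_neg (by rw [f1]; decide), if_neg (by rw [f2]; decide), if_pos h3, pvUpd_neg "Cabin:" pvConvText l a f1, pvUpd_neg "Customer:" pvConvText l b f2, pvUpd_pos_text "Phone:" l c h3, pvUpd_neg "Email:" pvConvText l d g4, pvUpd_neg "Notes:" pvConvText l e g5, pvUpd_neg "Adults:" pvConvInt l f g6, pvUpd_neg "Kids:" pvConvInt l g g7]
    rfl
  by_cases h4 : PySem.Str.startswith l "Email:" = true
  · have f1 : PySem.Str.startswith l "Cabin:" = false := (Bool.not_eq_true _).mp h1
    have f2 : PySem.Str.startswith l "Customer:" = false := (Bool.not_eq_true _).mp h2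
    have f3 : PySem.Str.startswith l "Phone:" = false := (Bool.not_eq_true _).mp h3
    have g5 : PySem.Str.startswith l "Notes:" = false := pvExcl "Email:" "Notes:" l (by decide) (by decide) h4
    have g6 : PySem.Str.startswith l "Adults:" = false := pvExcl "Email:" "Adults:" l (by decide) (by decide) h4
    have g7 : PySem.Str.startswith l "Kids:" = false := pvExcl "Email:" "Kids:" l (by decide) (by decide) h4
    rw [if_neg (by rw [f1]; decide), if_neg (by rw [f2]; decide), if_neg (by rw [f3]; decide), if_pos h4, pvUpd_neg "Cabin:" pvConvText l a f1, pvUpd_neg "Customer:" pvConvText l b f2, pvUpd_neg "Phone:" pvConvText l c f3, pvUpd_pos_text "Email:" l d h4, pvUpd_neg "Notes:" pvConvText l e g5, pvUpd_neg "Adults:" pvConvInt l f g6, pvUpd_neg "Kids:" pvConvInt l g g7]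
    rfl
  by_cases h5 : PySem.Str.startswith l "Notes:" = true
  · have f1 : PySem.Str.startswith l "Cabin:" = false := (Bool.not_eq_true _).mp h1
    have f2 : PySem.Str.startswith l "Customer:" = false := (Bool.not_eq_true _).mp h2
    have f3 : PySem.Str.startswith l "Phone:" = false := (Bool.not_eq_true _).mp h3
    have f4 : PySem.Str.startswith l "Email:" = false := (Bool.not_eq_true _).mp h4
    have g6 : PySem.Str.startswith l "Adults:" = false := pvExcl "Notes:" "Adults:" l (by decide) (by decide) h5
    have g7 : PySem.Str.startswith l "Kids:" = false := pvExcl "Notes:" "Kids:" l (by decide) (by decide) h5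
    rw [if_neg (by rw [f1]; decide), if_neg (by rw [f2]; decide), if_neg (by rw [f3]; decide), if_neg (by rw [f4]; decide), if_pos h5, pvUpd_neg "Cabin:" pvConvText l a f1, pvUpd_neg "Customer:" pvConvText l b f2, pvUpd_neg "Phone:" pvConvText l c f3, pvUpd_neg "Email:" pvConvText l d f4, pvUpd_pos_text "Notes:" l e h5, pvUpd_neg "Adults:" pvConvInt l f g6, pvUpd_neg "Kids:" pvConvInt l g g7]
    rfl
  by_cases h6 : PySem.Str.startswith l "Adults:" = true
  · have f1 : PySem.Str.startswith l "Cabin:" = false := (Bool.not_eq_true _).mp h1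
    have f2 : PySem.Str.startswith l "Customer:" = false := (Bool.not_eq_true _).mp h2
    have f3 : PySem.Str.startswith l "Phone:" = false := (Bool.not_eq_true _).mp h3
    have f4 : PySem.Str.startswith l "Email:" = false := (Bool.not_eq_true _).mp h4
    have f5 : PySem.Str.startswith l "Notes:" = false := (Bool.not_eq_true _).mp h5
    have g7 : PySem.Str.startswith l "Kids:" = false := pvExcl "Adults:" "Kids:" l (by decide) (by decide) h6
    rw [if_neg (by rw [f1]; decide), if_neg (by rw [f2]; decide), if_neg (by rw [f3]; decide), if_neg (by rw [f4]; decide), if_neg (by rw [f5]; decide), if_pos h6, pvUpd_neg "Cabin:" pvConvText l a f1, pvUpd_neg "Customer:" pvConvText l b f2, pvUpd_neg "Phone:" pvConvText l c f3, pvUpd_neg "Email:" pvConvText l d f4, pvUpd_neg "Notes:" pvConvText l e f5, pvUpd_pos_int "Adults:" l f h6, pvUpd_neg "Kids:" pvConvInt l g g7]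
    cases hx : PySem.Int.ofStr? (PySem.Str.strip (PySem.Str.replace l "Adults:" "")) <;> rfl
  by_cases h7 : PySem.Str.startswith l "Kids:" = true
  · have f1 : PySem.Str.startswith l "Cabin:" = false := (Bool.not_eq_true _).mp h1
    have f2 : PySem.Str.startswith l "Customer:" = false := (Bool.not_eq_true _).mp h2
    have f3 : PySem.Str.startswith l "Phone:" = false := (Bool.not_eq_true _).mp h3
    have f4 : PySem.Str.startswith l "Email:" = false := (Bool.not_eq_true _).mp h4
    have f5 : PySem.Str.startswith l "Notes:" = false := (Bool.not_eq_true _).mp h5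
    have f6 : PySem.Str.startswith l "Adults:" = false := (Bool.not_eq_true _).mp h6
    rw [if_neg (by rw [f1]; decide), if_neg (by rw [f2]; decide), if_neg (by rw [f3]; decide), if_neg (by rw [f4]; decide), if_neg (by rw [f5]; decide), if_neg (by rw [f6]; decide), if_pos h7, pvUpd_neg "Cabin:" pvConvText l a f1, pvUpd_neg "Customer:" pvConvText l b f2, pvUpd_neg "Phone:" pvConvText l c f3, pvUpd_neg "Email:" pvConvText l d f4, pvUpd_neg "Notes:" pvConvText l e f5, pvUpd_neg "Adults:" pvConvInt l f f6, pvUpd_pos_int "Kids:" l g h7]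
    cases hx : PySem.Int.ofStr? (PySem.Str.strip (PySem.Str.replace l "Kids:" "")) <;> rfl
  · have f1 : PySem.Str.startswith l "Cabin:" = false := (Bool.not_eq_true _).mp h1
    have f2 : PySem.Str.startswith l "Customer:" = false := (Bool.not_eq_true _).mp h2
    have f3 : PySem.Str.startswith l "Phone:" = false := (Bool.not_eq_true _).mp h3
    have f4 : PySem.Str.startswith l "Email:" = false := (Bool.not_eq_true _).mp h4
    have f5 : PySem.Str.startswith l "Notes:" = false := (Bool.not_eq_true _).mp h5
    have f6 : PySem.Str.startswith l "Adults:" = false := (Bool.not_eq_true _).mp h6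
    have f7 : PySem.Str.startswith l "Kids:" = false := (Bool.not_eq_true _).mp h7
    rw [if_neg (by rw [f1]; decide), if_neg (by rw [f2]; decide), if_neg (by rw [f3]; decide), if_neg (by rw [f4]; decide), if_neg (by rw [f5]; decide), if_neg (by rw [f6]; decide), if_neg (by rw [f7]; decide), pvUpd_neg "Cabin:" pvConvText l a f1, pvUpd_neg "Customer:" pvConvText l b f2, pvUpd_neg "Phone:" pvConvText l c f3, pvUpd_neg "Email:" pvConvText l d f4, pvUpd_neg "Notes:" pvConvText l e f5, pvUpd_neg "Adults:" pvConvInt l f f6, pvUpd_neg "Kids:" pvConvInt l g f7]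

-- A's whole loop, slot by slot: folding forward equals scanning the reversed list
theorem pvFoldRev (rs : List String) :
    List.foldl pvChainA pvInitA rs.reverse =
      pvMk (pvScanB "Cabin:" pvConvText rs) (pvScanB "Customer:" pvConvText rs)
        (pvScanB "Phone:" pvConvText rs) (pvScanB "Email:" pvConvText rs)
        (pvScanB "Notes:" pvConvText rs) (pvScanB "Adults:" pvConvInt rs)
        (pvScanB "Kids:" pvConvInt rs) := by
  induction rs with
  | nil => rfl
  | cons l rs ih =>
    rw [List.reverse_cons, List.foldl_append]
    simp only [List.foldl_cons, List.foldl_nil]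
    rw [ih, pvStepEq]
    simp only [pvScanB_cons]

-- ===== VERDICT (by name: the statement is the Claim_ definition above) =====
theorem parse_event_description_spec : Claim_equal_parse_event_description := by
  intro description _
  unfold Spec_parse_event_description parse_event_description parse_event_description_alt
  cases description with
  | none => rfl
  | some s =>
    by_cases h : s == ""
    · simp only [h, if_true]
      rfl
    · simp only [h, Bool.false_eq_true, if_false]
      rw [show (List.foldl (fun d raw => pvChainA d (PySem.Str.strip raw)) pvInitA
          ((PySem.Str.split? s "\n").getD [])) =
          List.foldl pvChainA pvInitA (((PySem.Str.split? s "\n").getD []).map PySem.Str.strip)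
        from List.foldl_map.symm]
      have h2 := pvFoldRev (((PySem.Str.split? s "\n").getD []).map PySem.Str.strip).reverse
      rw [List.reverse_reverse] at h2
      rw [h2]
      simp only [pvFieldsB, List.map, pvLastValueB]
      rw [pvOfList7]
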